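-- pv_equiv track=rewrite | github.com/Wontoni/comp8005-project | victim.py | get_char_freq
-- ===== SOURCE A (Python) =====
-- def get_char_freq(words):
--     char_dict = {}
--     words = [word.lower() for word in words]
--     words = "".join(words)
--     for c in words:
--         if c in char_dict:
--             char_dict[c] += 1
--         else:
--             char_dict[c] = 1
--     return char_dict
-- ===== SOURCE B (Python) =====
-- def get_char_freq(words):
--     chars = list("".join(words).lower())
--     return {c: chars.count(c) for c in dict.fromkeys(chars)}
-- ===== Notes on version B (the rewrite author's own statement) =====
-- stated objective: simpler
-- what changed: B keeps no running counter dict: it joins and lowercases once, takes the distinct characters in first-occurrence order via dict.fromkeys, and builds the result with one count() per distinct character.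
import Mathlib
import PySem

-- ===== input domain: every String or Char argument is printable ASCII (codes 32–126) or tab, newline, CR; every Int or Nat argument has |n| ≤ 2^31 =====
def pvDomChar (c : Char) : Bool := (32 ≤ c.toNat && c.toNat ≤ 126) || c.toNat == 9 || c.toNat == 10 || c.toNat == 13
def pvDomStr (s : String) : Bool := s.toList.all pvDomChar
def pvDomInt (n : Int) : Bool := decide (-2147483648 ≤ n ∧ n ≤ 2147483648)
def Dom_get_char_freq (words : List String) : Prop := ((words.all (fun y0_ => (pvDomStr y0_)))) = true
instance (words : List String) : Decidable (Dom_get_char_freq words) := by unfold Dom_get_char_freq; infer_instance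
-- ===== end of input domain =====

-- B replaces A's running counter dict with ordered dedup + one count per distinct character (simpler decomposition, same result).

-- ===== PORT A =====
def get_char_freq (words : List String) : List (String × Int) :=
  let ws := words.map PySem.Str.lower
  let s := PySem.Str.join "" ws
  (s.toList.foldl (fun d c =>
      if d.contains (String.ofList [c]) then d.modify (String.ofList [c]) 0 (· + 1)
      else d.insert (String.ofList [c]) (1 : Int)) PySem.Dict.empty).items

-- ===== PORT B =====
def get_char_freq_alt (words : List String) : List (String × Int) :=
  let chars := (PySem.Str.lower (PySem.Str.join "" words)).toList
  (PySem.List.dedup chars).map (fun c => (String.ofList [c], (chars.count c : Int)))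

-- ===== PRECONDITION & SPEC =====
def Spec_get_char_freq (words : List String) (out : List (String × Int)) : Prop := out = get_char_freq_alt words
instance (words : List String) (out : List (String × Int)) : Decidable (Spec_get_char_freq words out) := by unfold Spec_get_char_freq; infer_instance

-- ===== CLAIM (what is proved, stated in full; the proofs are below) =====
def Claim_equal_get_char_freq : Prop := ∀ (words : List String), Dom_get_char_freq words → Spec_get_char_freq words (get_char_freq words)

-- ===== LEMMAS AND PROOFS =====

-- single-character String.ofList is injective
theorem pv_mk_singleton_inj : Function.Injective (fun c : Char => String.ofList [c]) := by
  intro a b h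
  have := congrArg String.toList h
  simp at this
  exact this

-- A's if/else counter step is exactly Dict.modify with default 0
theorem pv_step_eq (d : PySem.Dict String Int) (k : String) :
    (if d.contains k then d.modify k 0 (· + 1) else d.insert k (1 : Int))
      = d.modify k 0 (· + 1) := by
  by_cases h : d.contains k = true
  · simp [h]
  · have h' : d.contains k = false := by simpa using h
    simp [h', PySem.Dict.modify, PySem.Dict.getD_of_not_contains d 0 h']

-- joining with "" is flatten
theorem pv_join_nil_eq_flatten (xs : List (List Char)) : PySem.Chars.join [] xs = xs.flatten := by
  unfold PySem.Chars.join
  induction xs with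
  | nil => rfl
  | cons h t ih =>
    cases t with
    | nil => simp [List.intercalate]
    | cons b bt => simp_all [List.intercalate, List.intersperse]

-- A lowers each word then joins; B joins then lowers — same character list
theorem pv_chars_eq (words : List String) :
    (PySem.Str.join "" (words.map PySem.Str.lower)).toList
      = (PySem.Str.lower (PySem.Str.join "" words)).toList := by
  simp only [PySem.Str.toList_join, PySem.Str.toList_lower, PySem.Chars.lower, List.map_map]
  rw [show ("" : String).toList = [] from rfl, pv_join_nil_eq_flatten, pv_join_nil_eq_flatten,
    List.map_flatten, List.map_map]
  apply congrArg
  apply List.map_congr_left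
  intro w _
  simp [PySem.Chars.lower]

-- ordered dedup commutes with an injective map
theorem pv_ofList_map_aux {α β : Type} [BEq α] [LawfulBEq α] [BEq β] [LawfulBEq β]
    (f : α → β) (hf : Function.Injective f) (l : List α) (s : PySem.Set α) :
    List.foldl PySem.Set.add (s.map f) (l.map f) = (List.foldl PySem.Set.add s l).map f := by
  induction l generalizing s with
  | nil => rfl
  | cons x t ih =>
    have hc : PySem.Set.contains (List.map f s) (f x) = PySem.Set.contains s x := by
      simp [PySem.Set.contains, hf.eq_iff]
    simp only [List.map_cons, List.foldl_cons, PySem.Set.add, hc]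
    split_ifs with h
    · exact ih s
    · have := ih (s ++ [x])
      simp at this
      exact this

theorem pv_dedup_map {α β : Type} [BEq α] [LawfulBEq α] [BEq β] [LawfulBEq β]
    (f : α → β) (hf : Function.Injective f) (l : List α) :
    PySem.Set.ofList (l.map f) = (PySem.Set.ofList l).map f := by
  unfold PySem.Set.ofList
  exact pv_ofList_map_aux f hf l PySem.Set.empty

-- ===== VERDICT (by name: the statement is the Claim_ definition above) =====
theorem get_char_freq_spec : Claim_equal_get_char_freq := by
  intro words _
  unfold Spec_get_char_freq get_char_freq get_char_freq_alt
  dsimp only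
  rw [← pv_chars_eq words]
  set cs := (PySem.Str.join "" (words.map PySem.Str.lower)).toList with hcs
  have hstep : cs.foldl (fun d c =>
      if d.contains (String.ofList [c]) then d.modify (String.ofList [c]) 0 (· + 1)
      else d.insert (String.ofList [c]) (1 : Int)) PySem.Dict.empty
      = PySem.Dict.counter (cs.map (fun c => String.ofList [c])) := by
    rw [PySem.Dict.counter_eq_foldl, List.foldl_map]
    exact PySem.List.foldl_congr_mem cs _ _ _
      (fun d c _ => pv_step_eq d (String.ofList [c]))
  rw [hstep, PySem.Dict.items_counter, pv_dedup_map _ pv_mk_singleton_inj, List.map_map,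
    PySem.List.dedup]
  apply List.map_congr_left
  intro c _
  simp only [Function.comp]
  rw [List.count_map_of_injective cs _ pv_mk_singleton_inj c]
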